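-- pv_equiv track=rewrite | github.com/bilalmachraa82/iva-margem-turismo | backend/app/analytics.py | _calculate_overall_rag
-- ===== SOURCE A (Python) =====
-- from typing import Dict, List, Optional, Tuple, Any
--
-- def _calculate_overall_rag(risks: List[Dict]) -> str:
--     """Calculate overall RAG status from individual risks"""
--     if any(risk["level"] == "critical" for risk in risks):
--         return "red"
--     elif any(risk["level"] == "high" for risk in risks):
--         return "amber"
--     elif any(risk["level"] == "medium" for risk in risks):
--         return "amber"
--     else:
--         return "green"
-- ===== SOURCE B (Python) =====
-- def _calculate_overall_rag(risks):
--     """Calculate overall RAG status from individual risks"""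
--     sev = {"critical": 2, "high": 1, "medium": 1}
--     worst = 0
--     for risk in risks:
--         worst = max(worst, sev.get(risk["level"], 0))
--     return "red" if worst == 2 else "amber" if worst == 1 else "green"
-- ===== Notes on version B (the rewrite author's own statement) =====
-- stated objective: alternative
-- what changed: Replaced the three short-circuiting any() scans over the list by a single accumulating pass that keeps the highest severity seen (critical=2, high/medium=1, other=0) and translates the running maximum to a colour at the end.
-- outside the precondition, e.g. on _calculate_overall_rag([{'level': 'critical'}, {}]): A returns 'red', B raises KeyError
import Mathlib
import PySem

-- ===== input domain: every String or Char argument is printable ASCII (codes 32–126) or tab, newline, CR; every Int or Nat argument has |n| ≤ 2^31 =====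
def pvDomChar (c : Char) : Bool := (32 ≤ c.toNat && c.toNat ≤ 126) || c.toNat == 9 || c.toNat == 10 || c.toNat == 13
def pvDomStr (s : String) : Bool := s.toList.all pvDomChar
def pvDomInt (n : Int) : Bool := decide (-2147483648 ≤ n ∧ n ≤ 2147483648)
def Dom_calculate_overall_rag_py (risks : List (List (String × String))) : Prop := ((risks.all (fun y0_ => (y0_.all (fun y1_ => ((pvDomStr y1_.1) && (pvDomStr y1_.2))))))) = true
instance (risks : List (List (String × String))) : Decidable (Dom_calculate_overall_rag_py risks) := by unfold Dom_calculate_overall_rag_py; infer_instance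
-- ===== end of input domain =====

-- B replaces A's three short-circuiting any() scans by one accumulating pass keeping the
-- highest severity seen (alternative decomposition, same O(n) cost).


-- ===== PORT A =====
-- risk["level"] is modelled as first-match lookup with default ""; Pre_ guarantees the key
-- exists, so the default is never read on admitted inputs.
def pvLevel (risk : List (String × String)) : String :=
  (risk.lookup "level").getD ""

def calculate_overall_rag_py (risks : List (List (String × String))) : String :=
  if risks.any (fun risk => pvLevel risk == "critical") then "red"
  else if risks.any (fun risk => pvLevel risk == "high") then "amber"
  else if risks.any (fun risk => pvLevel risk == "medium") then "amber"
  else "green"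

-- ===== PORT B =====
def pvSev (l : String) : Nat :=
  if l == "critical" then 2 else if l == "high" then 1 else if l == "medium" then 1 else 0

def calculate_overall_rag_py_alt (risks : List (List (String × String))) : String :=
  let worst := risks.foldl (fun w risk => max w (pvSev (pvLevel risk))) 0
  if worst == 2 then "red" else if worst == 1 then "amber" else "green"

-- ===== PRECONDITION & SPEC =====
-- Pre_ excludes lists in which some risk lacks the "level" key: there A raises KeyError unless
-- an earlier risk already satisfied the current any() scan (in which case A returns early),
-- while B's single pass reads every risk's "level" and raises KeyError.
def Pre_calculate_overall_rag_py (risks : List (List (String × String))) : Prop :=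
  ∀ risk ∈ risks, (risk.lookup "level").isSome = true
instance (risks : List (List (String × String))) : Decidable (Pre_calculate_overall_rag_py risks) := by
  unfold Pre_calculate_overall_rag_py; infer_instance

def pvWitness_calculate_overall_rag_py : (List (List (String × String))) :=
  [[("level", "high")], [("level", "low")]]

def Spec_calculate_overall_rag_py (risks : List (List (String × String))) (out : String) : Prop := out = calculate_overall_rag_py_alt risks
instance (risks : List (List (String × String))) (out : String) : Decidable (Spec_calculate_overall_rag_py risks out) := by unfold Spec_calculate_overall_rag_py; infer_instance

-- ===== CLAIM (what is proved, stated in full; the proofs are below) =====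
def Claim_equal_calculate_overall_rag_py : Prop := ∀ (risks : List (List (String × String))), Dom_calculate_overall_rag_py risks → Pre_calculate_overall_rag_py risks → Spec_calculate_overall_rag_py risks (calculate_overall_rag_py risks)

-- ===== LEMMAS AND PROOFS =====

-- the value of A's if-chain expressed as the worst severity, 0/1/2
def pvWorst (risks : List (List (String × String))) : Nat :=
  if risks.any (fun risk => pvLevel risk == "critical") then 2
  else if (risks.any (fun risk => pvLevel risk == "high")
        || risks.any (fun risk => pvLevel risk == "medium")) then 1
  else 0

lemma foldl_max_sev (risks : List (List (String × String))) (n : Nat) :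
    risks.foldl (fun w risk => max w (pvSev (pvLevel risk))) n = max n (pvWorst risks) := by
  induction risks generalizing n with
  | nil => simp [pvWorst]
  | cons r t ih =>
    simp only [List.foldl_cons, ih, pvWorst, List.any_cons]
    by_cases hc : pvLevel r == "critical" <;>
      by_cases hh : pvLevel r == "high" <;>
        by_cases hm : pvLevel r == "medium" <;>
          simp [pvSev, hc, hh, hm] <;> split_ifs <;> omega

theorem calculate_overall_rag_py_spec : Claim_equal_calculate_overall_rag_py := by
  intro risks _ _
  unfold Spec_calculate_overall_rag_py calculate_overall_rag_py calculate_overall_rag_py_alt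
  rw [foldl_max_sev]
  unfold pvWorst
  split_ifs <;> simp_all <;> tauto
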